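-- pv_equiv track=rewrite | github.com/gtg922r/ai-workflow | skill-creator/scripts/validate_skill.py | _consume_block
-- ===== SOURCE A (Python) =====
-- from typing import Any, Dict, List, Optional, Tuple
--
-- def _consume_block(lines: List[str], start_idx: int, parent_indent: int) -> Tuple[str, int]:
--     """
--     Consume indented lines following a key with an empty value (e.g., "description:").
--     Joins lines with spaces, trimming indentation.
--     Returns (text, next_index).
--     """
--     parts: List[str] = []
--     i = start_idx
--     while i < len(lines):
--         raw = lines[i].rstrip("\n")
--         if not raw.strip():
--             i += 1
--             continue
--         indent = len(raw) - len(raw.lstrip(" "))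
--         if indent <= parent_indent:
--             break
--         parts.append(raw.strip())
--         i += 1
--     return " ".join(parts).strip(), i
-- ===== SOURCE B (Python) =====
-- from typing import List, Tuple
--
-- def _consume_block(lines: List[str], start_idx: int, parent_indent: int) -> Tuple[str, int]:
--     # Two-phase decomposition: first find the boundary index, then assemble the text.
--     n = len(lines)
--     j = start_idx
--     while j < n:
--         raw = lines[j].rstrip("\n")
--         if raw.strip() and (len(raw) - len(raw.lstrip(" "))) <= parent_indent:
--             break
--         j += 1
--     parts = [s for k in range(start_idx, j) if (s := lines[k].rstrip("\n").strip())]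
--     return " ".join(parts).strip(), j
-- ===== Notes on version B (the rewrite author's own statement) =====
-- stated objective: alternative
-- what changed: A fuses boundary-finding and text assembly in one while-loop with a parts accumulator; B first scans for the boundary index j alone, then builds the text in a separate comprehension over lines[start_idx:j].
import Mathlib
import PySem

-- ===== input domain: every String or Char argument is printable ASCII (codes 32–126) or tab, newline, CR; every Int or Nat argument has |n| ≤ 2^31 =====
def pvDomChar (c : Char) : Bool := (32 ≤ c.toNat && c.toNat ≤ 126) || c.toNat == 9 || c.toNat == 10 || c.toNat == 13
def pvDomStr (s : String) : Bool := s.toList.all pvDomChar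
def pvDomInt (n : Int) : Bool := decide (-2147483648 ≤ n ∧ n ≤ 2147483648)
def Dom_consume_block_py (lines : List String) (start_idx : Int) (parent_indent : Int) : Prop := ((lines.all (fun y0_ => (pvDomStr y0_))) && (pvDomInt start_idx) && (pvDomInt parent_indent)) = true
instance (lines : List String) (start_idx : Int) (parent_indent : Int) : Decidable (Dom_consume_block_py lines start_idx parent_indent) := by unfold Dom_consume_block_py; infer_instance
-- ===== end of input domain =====

-- B separates boundary-finding from text assembly (two passes) where A fuses them in one accumulator loop; same result, same cost.

-- ===== PORT A =====
-- s.rstrip("\n"): hand port (PySem.Chars has only the both-ends stripChars); exact: drops exactly the trailing '\n' characters.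
def pvRstripNl (cs : List Char) : List Char := (cs.reverse.dropWhile (fun c => c == '\n')).reverse
-- s.lstrip(" "): hand port; exact: drops exactly the leading ' ' characters.
def pvLstripSp (cs : List Char) : List Char := cs.dropWhile (fun c => c == ' ')

-- the while-loop of A, state (i, parts); the fuel (lines.length - start_idx).toNat only bounds the
-- iteration count (i strictly increases and the loop stops once lines.length ≤ i), so the 0-case is never
-- the reason the loop stops; 'raw' is written out at each use
def consumeA_loop (lines : List String) (parent_indent : Int) : Nat → Int → List (List Char) → String × Int
  | 0, i, parts => (String.ofList (PySem.Chars.strip (PySem.Chars.join [' '] parts)), i)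
  | fuel + 1, i, parts =>
    if i < (lines.length : Int) then
      if (PySem.Chars.strip (pvRstripNl (PySem.List.pyGetD lines i "").toList)).isEmpty then
        consumeA_loop lines parent_indent fuel (i + 1) parts
      else
        if (((pvRstripNl (PySem.List.pyGetD lines i "").toList).length : Int)
              - ((pvLstripSp (pvRstripNl (PySem.List.pyGetD lines i "").toList)).length : Int)
              ≤ parent_indent) then
          (String.ofList (PySem.Chars.strip (PySem.Chars.join [' '] parts)), i)
        else
          consumeA_loop lines parent_indent fuel (i + 1)
            (parts ++ [PySem.Chars.strip (pvRstripNl (PySem.List.pyGetD lines i "").toList)])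
    else
      (String.ofList (PySem.Chars.strip (PySem.Chars.join [' '] parts)), i)

def consume_block_py (lines : List String) (start_idx : Int) (parent_indent : Int) : String × Int :=
  consumeA_loop lines parent_indent ((lines.length : Int) - start_idx).toNat start_idx []

-- ===== PORT B =====
-- pass 1 of B: scan for the boundary index j (first non-blank line with indent ≤ parent_indent); same fuel convention
def consumeB_find (lines : List String) (parent_indent : Int) : Nat → Int → Int
  | 0, j => j
  | fuel + 1, j =>
    if j < (lines.length : Int) then
      if ¬ (PySem.Chars.strip (pvRstripNl (PySem.List.pyGetD lines j "").toList)).isEmpty ∧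
         (((pvRstripNl (PySem.List.pyGetD lines j "").toList).length : Int)
            - ((pvLstripSp (pvRstripNl (PySem.List.pyGetD lines j "").toList)).length : Int)
            ≤ parent_indent) then
        j
      else
        consumeB_find lines parent_indent fuel (j + 1)
    else
      j

def consume_block_py_alt (lines : List String) (start_idx : Int) (parent_indent : Int) : String × Int :=
  let j := consumeB_find lines parent_indent ((lines.length : Int) - start_idx).toNat start_idx
  -- pass 2: the comprehension [s for k in range(start_idx, j) if (s := lines[k].rstrip("\n").strip())]
  let parts := ((PySem.List.pyRange start_idx j 1).map
      (fun k => PySem.Chars.strip (pvRstripNl (PySem.List.pyGetD lines k "").toList))).filter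
      (fun s => !s.isEmpty)
  (String.ofList (PySem.Chars.strip (PySem.Chars.join [' '] parts)), j)

-- ===== PRECONDITION & SPEC =====
-- Python A raises IndexError (negative index past the front) exactly when start_idx < -len(lines); B raises there too.
def Pre_consume_block_py (lines : List String) (start_idx : Int) (parent_indent : Int) : Prop :=
  -(lines.length : Int) ≤ start_idx
instance (lines : List String) (start_idx : Int) (parent_indent : Int) : Decidable (Pre_consume_block_py lines start_idx parent_indent) := by unfold Pre_consume_block_py; infer_instance

def pvWitness_consume_block_py : List String × Int × Int := (["  a", "  b", "", "c"], 0, 0)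

def Spec_consume_block_py (lines : List String) (start_idx : Int) (parent_indent : Int) (out : String × Int) : Prop := out = consume_block_py_alt lines start_idx parent_indent
instance (lines : List String) (start_idx : Int) (parent_indent : Int) (out : String × Int) : Decidable (Spec_consume_block_py lines start_idx parent_indent out) := by unfold Spec_consume_block_py; infer_instance

-- ===== CLAIM (what is proved, stated in full; the proofs are below) =====
def Claim_equal_consume_block_py : Prop := ∀ (lines : List String) (start_idx : Int) (parent_indent : Int), Dom_consume_block_py lines start_idx parent_indent → Pre_consume_block_py lines start_idx parent_indent → Spec_consume_block_py lines start_idx parent_indent (consume_block_py lines start_idx parent_indent)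

-- ===== LEMMAS AND PROOFS =====

-- B's parts comprehension, parameterised by the range bounds (proof abbreviation)
def pvParts (lines : List String) (a b : Int) : List (List Char) :=
  ((PySem.List.pyRange a b 1).map
      (fun k => PySem.Chars.strip (pvRstripNl (PySem.List.pyGetD lines k "").toList))).filter
      (fun s => !s.isEmpty)

theorem consumeB_find_le (lines : List String) (p : Int) :
    ∀ (fuel : Nat) (j : Int), j ≤ consumeB_find lines p fuel j := by
  intro fuel
  induction fuel with
  | zero => intro j; simp [consumeB_find]
  | succ fuel ih =>
    intro j
    rw [consumeB_find]
    by_cases h : j < (lines.length : Int)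
    · rw [if_pos h]
      by_cases hc : ¬ (PySem.Chars.strip (pvRstripNl (PySem.List.pyGetD lines j "").toList)).isEmpty ∧
         (((pvRstripNl (PySem.List.pyGetD lines j "").toList).length : Int)
            - ((pvLstripSp (pvRstripNl (PySem.List.pyGetD lines j "").toList)).length : Int) ≤ p)
      · rw [if_pos hc]
      · rw [if_neg hc]
        have := ih (j + 1)
        omega
    · rw [if_neg h]

theorem consumeA_loop_eq (lines : List String) (p : Int) :
    ∀ (fuel : Nat) (i : Int) (parts : List (List Char)),
      consumeA_loop lines p fuel i parts =
        (String.ofList (PySem.Chars.strip (PySem.Chars.join [' ']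
            (parts ++ pvParts lines i (consumeB_find lines p fuel i)))),
         consumeB_find lines p fuel i) := by
  intro fuel
  induction fuel with
  | zero =>
    intro i parts
    rw [consumeA_loop, consumeB_find]
    unfold pvParts
    rw [PySem.List.pyRange_one_eq_nil (le_refl i)]
    simp
  | succ fuel ih =>
    intro i parts
    rw [consumeA_loop, consumeB_find]
    by_cases h : i < (lines.length : Int)
    · rw [if_pos h, if_pos h]
      by_cases hb : (PySem.Chars.strip (pvRstripNl (PySem.List.pyGetD lines i "").toList)).isEmpty = true
      · -- blank line: both advance; the element at i is filtered out of B's parts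
        rw [if_pos hb, if_neg (by simp [hb])]
        have hle : i + 1 ≤ consumeB_find lines p fuel (i + 1) := consumeB_find_le lines p fuel (i + 1)
        rw [ih (i + 1) parts]
        unfold pvParts
        rw [PySem.List.pyRange_one_cons (by omega : i < consumeB_find lines p fuel (i + 1))]
        simp [hb]
      · by_cases hi : (((pvRstripNl (PySem.List.pyGetD lines i "").toList).length : Int)
              - ((pvLstripSp (pvRstripNl (PySem.List.pyGetD lines i "").toList)).length : Int) ≤ p)
        · -- boundary: A returns here; B's scan stops at i, so the range is empty
          rw [if_neg (by simp [hb]), if_pos hi, if_pos ⟨by simp [hb], hi⟩]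
          unfold pvParts
          rw [PySem.List.pyRange_one_eq_nil (le_refl i)]
          simp
        · -- consumed line: A appends strip(raw); B keeps the element at i in the range
          rw [if_neg (by simp [hb]), if_neg hi, if_neg (by tauto)]
          have hle : i + 1 ≤ consumeB_find lines p fuel (i + 1) := consumeB_find_le lines p fuel (i + 1)
          rw [ih (i + 1)
              (parts ++ [PySem.Chars.strip (pvRstripNl (PySem.List.pyGetD lines i "").toList)])]
          unfold pvParts
          rw [PySem.List.pyRange_one_cons (by omega : i < consumeB_find lines p fuel (i + 1))]
          simp [hb]
    · rw [if_neg h, if_neg h]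
      unfold pvParts
      rw [PySem.List.pyRange_one_eq_nil (le_refl i)]
      simp

-- ===== VERDICT (by name: the statement is the Claim_ definition above) =====
theorem consume_block_py_spec : Claim_equal_consume_block_py := by
  intro lines start_idx parent_indent _ _
  unfold Spec_consume_block_py consume_block_py consume_block_py_alt
  rw [consumeA_loop_eq]
  rfl
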